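-- pv_equiv track=rewrite | github.com/jagdishwar/CP | Smallest sequence with given Primes.py | kadanealgo
-- ===== SOURCE A (Python) =====
-- def kadanealgo(list1):
--     set1=set()
--     sum1=0
--     count=0
--     for i in list1:
--         sum1+=i
--
--         if sum1==0:
--             count+=1
--         elif sum1 in set1:
--             count+=1
--         set1.add(sum1)
--     return(count)
-- ===== SOURCE B (Python) =====
-- def kadanealgo(list1):
--     prefixes = []
--     s = 0
--     for x in list1:
--         s += x
--         prefixes.append(s)
--     prefixes.sort()
--     count = 0
--     prev = None
--     for p in prefixes:
--         if p == 0 or p == prev: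
--             count += 1
--         prev = p
--     return count
-- ===== Notes on version B (the rewrite author's own statement) =====
-- stated objective: alternative
-- what changed: B materialises the list of prefix sums, sorts it, and counts in one scan every zero entry and every nonzero entry equal to its sorted predecessor (each duplicate run of length k contributes k-1), instead of A's single pass with a membership set.
import Mathlib
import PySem

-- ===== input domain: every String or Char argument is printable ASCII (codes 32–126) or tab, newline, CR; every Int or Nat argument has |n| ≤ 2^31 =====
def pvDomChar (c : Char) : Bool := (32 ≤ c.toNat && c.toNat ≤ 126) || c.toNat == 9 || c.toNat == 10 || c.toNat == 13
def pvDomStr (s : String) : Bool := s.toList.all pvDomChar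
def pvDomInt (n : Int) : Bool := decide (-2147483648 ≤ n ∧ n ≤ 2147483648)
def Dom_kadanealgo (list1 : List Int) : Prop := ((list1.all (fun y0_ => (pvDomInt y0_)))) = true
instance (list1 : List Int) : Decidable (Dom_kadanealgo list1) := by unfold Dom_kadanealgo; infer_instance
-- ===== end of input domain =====

-- B materialises the prefix sums, sorts them, and in one scan counts every zero
-- entry and every nonzero entry equal to its sorted predecessor (objective: alternative).


-- ===== PORT A =====
-- state: (set1, sum1, count)
def kadanealgoStep (st : PySem.Set Int × Int × Int) (i : Int) : PySem.Set Int × Int × Int :=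
  let sum1 := st.2.1 + i
  let count :=
    if sum1 = 0 then st.2.2 + 1
    else if PySem.Set.contains st.1 sum1 then st.2.2 + 1
    else st.2.2
  (PySem.Set.add st.1 sum1, sum1, count)

def kadanealgo (list1 : List Int) : Int :=
  (list1.foldl kadanealgoStep (PySem.Set.empty, 0, 0)).2.2

-- ===== PORT B =====
-- first loop: state (s, prefixes)
def kadanealgoAltPrefStep (st : Int × List Int) (x : Int) : Int × List Int :=
  (st.1 + x, st.2 ++ [st.1 + x])

-- second loop: state (count, prev)
def kadanealgoAltScanStep (st : Int × Option Int) (p : Int) : Int × Option Int :=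
  ((if p = 0 ∨ some p = st.2 then st.1 + 1 else st.1), some p)

def kadanealgo_alt (list1 : List Int) : Int :=
  let prefixes := (list1.foldl kadanealgoAltPrefStep (0, [])).2
  let sortedPr := PySem.List.sorted prefixes (fun x => x) false
  (sortedPr.foldl kadanealgoAltScanStep (0, none)).1

-- ===== PRECONDITION & SPEC =====
def Spec_kadanealgo (list1 : List Int) (out : Int) : Prop := out = kadanealgo_alt list1
instance (list1 : List Int) (out : Int) : Decidable (Spec_kadanealgo list1 out) := by unfold Spec_kadanealgo; infer_instance

-- ===== CLAIM (what is proved, stated in full; the proofs are below) =====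
def Claim_equal_kadanealgo : Prop := ∀ (list1 : List Int), Dom_kadanealgo list1 → Spec_kadanealgo list1 (kadanealgo list1)

-- ===== LEMMAS AND PROOFS =====

-- the list of prefix sums of l starting from running sum `sum`
def prefList (sum : Int) : List Int → List Int
  | [] => []
  | x :: t => (sum + x) :: prefList (sum + x) t

theorem prefStep_eq (l : List Int) (sum : Int) (acc : List Int) :
    (l.foldl kadanealgoAltPrefStep (sum, acc)).2 = acc ++ prefList sum l := by
  induction l generalizing sum acc with
  | nil => simp [prefList]
  | cons x t ih => simp [kadanealgoAltPrefStep, prefList, ih]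

-- A-side invariant: the count equals the number of elements minus the number of
-- new distinct nonzero prefix sums (those not already in set1).
theorem kadanealgo_count (l : List Int) (s1 : PySem.Set Int) (sum c : Int) :
    (l.foldl kadanealgoStep (s1, sum, c)).2.2
      = c + (l.length : Int)
        - (((prefList sum l).toFinset.filter (fun v => v ≠ 0 ∧ v ∉ s1)).card : Int) := by
  induction l generalizing s1 sum c with
  | nil => simp [prefList]
  | cons x t ih =>
    simp only [List.foldl_cons, kadanealgoStep, prefList, List.toFinset_cons, List.length_cons]
    by_cases h0 : sum + x = 0
    · rw [if_pos h0, ih]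
      have hfe : ((insert (sum + x) (prefList (sum + x) t).toFinset).filter
            (fun v => v ≠ 0 ∧ v ∉ s1)).card
          = (((prefList (sum + x) t).toFinset).filter
            (fun v => v ≠ 0 ∧ v ∉ PySem.Set.add s1 (sum + x))).card := by
        rw [Finset.filter_insert, if_neg (by simp [h0])]
        congr 1
        apply Finset.filter_congr
        intro v _
        simp only [PySem.Set.mem_add, h0]
        constructor
        · rintro ⟨hv, hns⟩; exact ⟨hv, by rintro (h | h) <;> [exact hns h; exact hv h]⟩
        · rintro ⟨hv, hns⟩; exact ⟨hv, fun h => hns (Or.inl h)⟩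
      rw [← hfe]; push_cast; ring
    · rw [if_neg h0]
      by_cases hm : (sum + x) ∈ s1
      · rw [if_pos ((PySem.Set.contains_iff _ _).mpr hm), PySem.Set.add_of_mem hm, ih]
        have hfe : ((insert (sum + x) (prefList (sum + x) t).toFinset).filter
              (fun v => v ≠ 0 ∧ v ∉ s1)).card
            = (((prefList (sum + x) t).toFinset).filter (fun v => v ≠ 0 ∧ v ∉ s1)).card := by
          rw [Finset.filter_insert, if_neg (by simp [hm])]
        rw [← hfe]; push_cast; ring
      · rw [if_neg (fun h => hm ((PySem.Set.contains_iff _ _).mp h)),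
            PySem.Set.add_of_not_mem hm, ih]
        have hfe : ((insert (sum + x) (prefList (sum + x) t).toFinset).filter
              (fun v => v ≠ 0 ∧ v ∉ s1)).card
            = (((prefList (sum + x) t).toFinset).filter
              (fun v => v ≠ 0 ∧ v ∉ s1 ++ [sum + x])).card + 1 := by
          rw [Finset.filter_insert, if_pos ⟨h0, hm⟩]
          rw [Finset.card_insert_eq_ite]
          have herase : (((prefList (sum + x) t).toFinset).filter
                (fun v => v ≠ 0 ∧ v ∉ s1 ++ [sum + x]))
              = (((prefList (sum + x) t).toFinset).filter
                (fun v => v ≠ 0 ∧ v ∉ s1)).erase (sum + x) := by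
            ext v
            simp only [Finset.mem_filter, Finset.mem_erase, List.mem_append,
              List.mem_singleton]
            constructor
            · rintro ⟨hvm, hv, hns⟩
              exact ⟨fun h => hns (Or.inr h), hvm, hv, fun h => hns (Or.inl h)⟩
            · rintro ⟨hne, hvm, hv, hns⟩
              exact ⟨hvm, hv, by rintro (h | h) <;> [exact hns h; exact hne h]⟩
          rw [herase]
          split_ifs with hmem
          · rw [Finset.card_erase_of_mem hmem]
            have : 0 < (((prefList (sum + x) t).toFinset).filter
                (fun v => v ≠ 0 ∧ v ∉ s1)).card := Finset.card_pos.mpr ⟨_, hmem⟩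
            omega
          · rw [Finset.erase_eq_of_notMem hmem]
        rw [hfe]; push_cast; ring

-- B-side scan invariant, for a sorted suffix L with every element ≥ prev (if any).
theorem scan_count (L : List Int) (c : Int) (prev : Option Int)
    (hsort : L.Pairwise (· ≤ ·))
    (hprev : ∀ a, prev = some a → ∀ y ∈ L, a ≤ y) :
    (L.foldl kadanealgoAltScanStep (c, prev)).1
      = c + (L.length : Int)
        - ((L.toFinset.filter (fun v => v ≠ 0 ∧ some v ≠ prev)).card : Int) := by
  induction L generalizing c prev with
  | nil => simp
  | cons x t ih =>
    have hx : ∀ y ∈ t, x ≤ y := fun y hy => (List.pairwise_cons.mp hsort).1 y hy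
    have ht : t.Pairwise (· ≤ ·) := (List.pairwise_cons.mp hsort).2
    have hprevx : ∀ a, prev = some a → a ≤ x := fun a ha =>
      hprev a ha x (List.mem_cons_self)
    have hprevt : ∀ a : Int, (some x : Option Int) = some a → ∀ y ∈ t, a ≤ y := by
      rintro a ha y hy; cases ha; exact hx y hy
    -- elements of t other than x cannot equal any a with prev = some a
    have hnotprev : ∀ v ∈ t, v ≠ x → some v ≠ prev := by
      intro v hv hvx hc
      obtain ⟨a, rfl⟩ : ∃ a, prev = some a := by
        cases prev with
        | none => exact absurd hc (by simp)
        | some a => exact ⟨a, rfl⟩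
      have h1 : a ≤ x := hprevx a rfl
      have h2 : x ≤ v := hx v hv
      have : (a : Int) = v := by injection hc.symm
      omega
    simp only [List.foldl_cons, kadanealgoAltScanStep, List.toFinset_cons, List.length_cons]
    by_cases hc : x = 0 ∨ some x = prev
    · rw [if_pos hc, ih _ _ ht hprevt]
      have hfe : ((insert x t.toFinset).filter (fun v => v ≠ 0 ∧ some v ≠ prev)).card
          = (t.toFinset.filter (fun v => v ≠ 0 ∧ some v ≠ some x)).card := by
        rw [Finset.filter_insert, if_neg (by rcases hc with h | h <;> simp [h])]
        congr 1
        apply Finset.filter_congr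
        intro v hv
        simp only [ne_eq, Option.some.injEq, and_congr_right_iff]
        intro hv0
        rcases hc with h | h
        · subst h
          constructor
          · intro _ hvx; exact hv0 hvx
          · intro _ hvp
            exact hnotprev v (List.mem_toFinset.mp hv) (fun h => hv0 (h.trans rfl)) (by simp [hvp]) |>.elim
        · subst h
          constructor
          · intro hp hvx; exact hp (by simp [hvx])
          · intro hvx hp; exact hvx (by injection hp)
      rw [← hfe]; push_cast; ring
    · rw [if_neg hc]
      rw [not_or] at hc
      obtain ⟨hx0, hxp⟩ := hc
      rw [ih _ _ ht hprevt]
      have hfe : ((insert x t.toFinset).filter (fun v => v ≠ 0 ∧ some v ≠ prev)).card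
          = (t.toFinset.filter (fun v => v ≠ 0 ∧ some v ≠ some x)).card + 1 := by
        rw [Finset.filter_insert, if_pos ⟨hx0, hxp⟩, Finset.card_insert_eq_ite]
        have herase : t.toFinset.filter (fun v => v ≠ 0 ∧ some v ≠ some x)
            = (t.toFinset.filter (fun v => v ≠ 0 ∧ some v ≠ prev)).erase x := by
          ext v
          simp only [Finset.mem_filter, Finset.mem_erase, ne_eq, Option.some.injEq]
          constructor
          · rintro ⟨hvm, hv0, hvx⟩
            exact ⟨hvx, hvm, hv0, fun h =>
              hnotprev v (List.mem_toFinset.mp hvm) hvx (by simp [h])⟩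
          · rintro ⟨hvx, hvm, hv0, _⟩
            exact ⟨hvm, hv0, hvx⟩
        rw [herase]
        split_ifs with hmem
        · rw [Finset.card_erase_of_mem hmem]
          have : 0 < (t.toFinset.filter (fun v => v ≠ 0 ∧ some v ≠ prev)).card :=
            Finset.card_pos.mpr ⟨_, hmem⟩
          omega
        · rw [Finset.erase_eq_of_notMem hmem]
      rw [hfe]; push_cast; ring

-- length of the prefix-sum list
theorem prefList_length (l : List Int) (sum : Int) : (prefList sum l).length = l.length := by
  induction l generalizing sum with
  | nil => simp [prefList]
  | cons x t ih => simp [prefList, ih]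

-- ===== VERDICT (by name: the statement is the Claim_ definition above) =====
theorem kadanealgo_spec : Claim_equal_kadanealgo := by
  intro list1 _
  unfold Spec_kadanealgo kadanealgo kadanealgo_alt
  have hpref := prefStep_eq list1 0 []
  simp only [List.nil_append] at hpref
  rw [hpref]
  set P := prefList 0 list1 with hP
  have hperm : (PySem.List.sorted P (fun x => x) false).Perm P :=
    PySem.List.sorted_perm P (fun x => x) false
  have hB := scan_count (PySem.List.sorted P (fun x => x) false) 0 none
    (by simpa using PySem.List.sorted_pairwise P (fun x => x))
    (by intro a ha; cases ha)
  rw [hB, kadanealgo_count list1 PySem.Set.empty 0 0, hperm.length_eq,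
    List.toFinset_eq_of_perm _ _ hperm, prefList_length]
  have hfilters : P.toFinset.filter (fun v => v ≠ 0 ∧ some v ≠ none)
      = P.toFinset.filter (fun v => v ≠ 0 ∧ v ∉ PySem.Set.empty) := by
    apply Finset.filter_congr
    intro v _
    simp [PySem.Set.empty]
  rw [hfilters]
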